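-- pv_equiv track=rewrite | github.com/ghattab/secondarydata | data/utility_functions.py | replace_comma_in_text
-- ===== SOURCE A (Python) =====
-- def replace_comma_in_text(text):
--     """
--     Parameters
--     ----------
--     text: str of nominal values for a single mushroom species from primary_data_edited.csv
--
--     Returns
--     -------
--     replace commas outside of angular brackets with semicolons (but not inside of them)
--
--     Example
--     -------
--     text = "[a, b], [c, d]"
--     return: "[a, b]; [c, d]"
--     """
--
--     result_text = ""
--     replace = True
--     for sign in text:
--         if sign == '[':
--             replace = False
--         if sign == ']':
--             replace = True
--         if sign == ',':
--             if replace: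
--                 result_text += ';'
--             else:
--                 result_text += sign
--         else:
--             result_text += sign
--
--     return result_text
-- ===== SOURCE B (Python) =====
-- def replace_comma_in_text(text):
--     # partition-based: bulk-replace commas before the next '[', copy the
--     # bracketed chunk up to the next ']' verbatim, recurse on the rest
--     before, bra, rest = text.partition('[')
--     out = before.replace(',', ';')
--     if not bra:
--         return out
--     inside, ket, after = rest.partition(']')
--     return out + '[' + inside + ket + replace_comma_in_text(after)
-- ===== Notes on version B (the rewrite author's own statement) =====
-- stated objective: faster
-- what changed: Replaced the per-character loop with its manual replace flag by partition-based recursion: partition at the next opening bracket, bulk str.replace commas to semicolons in the outside segment, copy the bracketed chunk through the next closing bracket verbatim, and recurse on the remainder.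
import Mathlib
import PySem

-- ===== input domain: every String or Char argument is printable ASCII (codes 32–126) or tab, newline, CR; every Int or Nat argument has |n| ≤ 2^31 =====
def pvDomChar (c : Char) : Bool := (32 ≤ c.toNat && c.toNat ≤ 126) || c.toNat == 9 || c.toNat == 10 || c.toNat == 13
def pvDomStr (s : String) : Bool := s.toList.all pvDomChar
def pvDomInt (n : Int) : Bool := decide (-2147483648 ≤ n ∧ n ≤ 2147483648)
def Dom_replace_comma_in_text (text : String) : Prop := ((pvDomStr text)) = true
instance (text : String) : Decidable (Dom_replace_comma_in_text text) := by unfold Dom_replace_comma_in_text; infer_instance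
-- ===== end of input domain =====

-- B replaces A's per-character flag loop by partition-based recursion with bulk str.replace/partition (measured faster by a constant factor).

-- ===== PORT A =====
-- literal port of A: one pass over the characters, accumulating (result_text, replace)
def stepA (st : List Char × Bool) (sign : Char) : List Char × Bool :=
  let r1 := if sign = '[' then false else st.2
  let r2 := if sign = ']' then true else r1
  if sign = ',' then
    (if r2 then st.1 ++ [';'] else st.1 ++ [sign], r2)
  else
    (st.1 ++ [sign], r2)

def replace_comma_in_text (text : String) : String :=
  String.ofList ((text.toList.foldl stepA ([], true)).1)

-- ===== PORT B =====
-- hand port of Python's str.partition(ch) for a single-character separator: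
-- (before, sep, after), sep = [ch] at the first occurrence, or ([s],[],[]) if absent.  Exact.
def pyPartition (ch : Char) : List Char → List Char × List Char × List Char
  | [] => ([], [], [])
  | c :: cs =>
      if c = ch then ([], [ch], cs)
      else
        let t := pyPartition ch cs
        (c :: t.1, t.2.1, t.2.2)

-- termination fact the port's recursion needs
theorem pyPartition_after_le (ch : Char) : ∀ cs : List Char,
    (pyPartition ch cs).2.2.length ≤ cs.length ∧
      ((pyPartition ch cs).2.1 ≠ [] → (pyPartition ch cs).2.2.length < cs.length) := by
  intro cs
  induction cs with
  | nil => simp [pyPartition]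
  | cons c cs ih =>
    by_cases h : c = ch <;> simp [pyPartition, h] <;> try omega

-- port of Source B: partition at '[', bulk-replace, copy through ']', recurse on the rest
def goB (cs : List Char) : List Char :=
  let t1 := pyPartition '[' cs
  let out := PySem.Chars.replace t1.1 [','] [';']
  if h : t1.2.1 = [] then out
  else
    let t2 := pyPartition ']' t1.2.2
    out ++ '[' :: (t2.1 ++ t2.2.1 ++ goB t2.2.2)
termination_by cs.length
decreasing_by
  have h1 := pyPartition_after_le '[' cs
  have h2 := pyPartition_after_le ']' (pyPartition '[' cs).2.2
  exact lt_of_le_of_lt h2.1 (h1.2 h)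

def replace_comma_in_text_alt (text : String) : String :=
  String.ofList (goB text.toList)

-- ===== PRECONDITION & SPEC =====
def Spec_replace_comma_in_text (text : String) (out : String) : Prop := out = replace_comma_in_text_alt text
instance (text : String) (out : String) : Decidable (Spec_replace_comma_in_text text out) := by unfold Spec_replace_comma_in_text; infer_instance

-- ===== CLAIM (what is proved, stated in full; the proofs are below) =====
def Claim_equal_replace_comma_in_text : Prop := ∀ (text : String), Dom_replace_comma_in_text text → Spec_replace_comma_in_text text (replace_comma_in_text text)

-- ===== LEMMAS AND PROOFS =====

-- A's loop body as structural recursion on the characters, with the flag as state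
def goA : Bool → List Char → List Char
  | _, [] => []
  | r, c :: cs =>
      let r1 := if c = '[' then false else r
      let r2 := if c = ']' then true else r1
      (if c = ',' ∧ r2 then ';' else c) :: goA r2 cs

theorem foldA_eq_goA : ∀ (cs : List Char) (st : List Char × Bool),
    (cs.foldl stepA st).1 = st.1 ++ goA st.2 cs := by
  intro cs
  induction cs with
  | nil => simp [goA]
  | cons c cs ih =>
    intro st
    rw [List.foldl_cons, ih (stepA st c)]
    by_cases h1 : c = '[' <;> by_cases h2 : c = ']' <;> by_cases h4 : c = ',' <;>
      by_cases hr : st.2 = true <;>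
        simp_all [stepA, goA]

-- str.replace(',', ';') on a comma/semicolon pair is the character map
theorem replace_go_comma : ∀ (fuel : Nat) (l acc : List Char), l.length ≤ fuel →
    PySem.Chars.replace.go [','] [';'] fuel l acc =
      acc.reverse ++ l.map (fun c => if c = ',' then ';' else c) := by
  intro fuel
  induction fuel with
  | zero =>
    intro l acc h
    have : l = [] := List.eq_nil_of_length_eq_zero (Nat.le_zero.mp h)
    simp [this, PySem.Chars.replace.go]
  | succ n ih =>
    intro l acc h
    cases l with
    | nil => simp [PySem.Chars.replace.go]
    | cons c t =>
      by_cases hc : c = ','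
      · simp [PySem.Chars.replace.go, hc, List.isPrefixOf,
          ih t (';' :: acc) (by simpa using Nat.succ_le_succ_iff.mp (by simpa using h))]
      · simp [PySem.Chars.replace.go, List.isPrefixOf, hc, Ne.symm hc,
          ih t (c :: acc) (by simpa using Nat.succ_le_succ_iff.mp (by simpa using h))]

theorem replace_comma_map (l : List Char) :
    PySem.Chars.replace l [','] [';'] = l.map (fun c => if c = ',' then ';' else c) := by
  simpa using replace_go_comma l.length l [] le_rfl

-- pyPartition decomposes its input
theorem pyPartition_decomp (ch : Char) : ∀ cs : List Char,
    cs = (pyPartition ch cs).1 ++ (pyPartition ch cs).2.1 ++ (pyPartition ch cs).2.2 ∧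
      ch ∉ (pyPartition ch cs).1 ∧
      ((pyPartition ch cs).2.1 = [] ∨ (pyPartition ch cs).2.1 = [ch]) ∧
      ((pyPartition ch cs).2.1 = [] → (pyPartition ch cs).2.2 = [] ∧ (pyPartition ch cs).1 = cs) := by
  intro cs
  induction cs with
  | nil => simp [pyPartition]
  | cons c cs ih =>
    by_cases h : c = ch
    · simp [pyPartition, h]
    · simpa [pyPartition, h, Ne.symm h] using ih

-- over a '['-free prefix the flag stays true and A maps every comma to ';'
theorem goA_true_no_open : ∀ (pre rest : List Char), '[' ∉ pre →
    goA true (pre ++ rest) = pre.map (fun c => if c = ',' then ';' else c) ++ goA true rest := by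
  intro pre
  induction pre with
  | nil => simp
  | cons c pre ih =>
    intro rest hc
    have h1 : ¬ c = '[' := fun h => hc (h ▸ List.mem_cons_self)
    have h2 : '[' ∉ pre := fun h => hc (List.mem_cons_of_mem _ h)
    by_cases h3 : c = ']' <;> by_cases h4 : c = ',' <;>
      simp [goA, h1, h3, h4, ih rest h2]

-- with the flag off, A copies through the next ']' and resumes with the flag on
theorem goA_false_part : ∀ cs : List Char,
    goA false cs = (pyPartition ']' cs).1 ++ (pyPartition ']' cs).2.1 ++
      goA true (pyPartition ']' cs).2.2 := by
  intro cs
  induction cs with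
  | nil => simp [goA, pyPartition]
  | cons c cs ih =>
    by_cases h : c = ']'
    · simp [goA, pyPartition, h]
    · by_cases h4 : c = ',' <;> by_cases h1 : c = '[' <;>
        simp [goA, pyPartition, h, h4, h1, ih]

theorem goA_eq_goB : ∀ (n : Nat) (cs : List Char), cs.length ≤ n → goA true cs = goB cs := by
  intro n
  induction n with
  | zero =>
    intro cs h
    have : cs = [] := List.eq_nil_of_length_eq_zero (Nat.le_zero.mp h)
    simp [this, goA, goB, pyPartition, replace_comma_map]
  | succ n ih =>
    intro cs h
    obtain ⟨hdec, hnotin, hsep, hempty⟩ := pyPartition_decomp '[' cs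
    rw [goB]
    by_cases hs : (pyPartition '[' cs).2.1 = []
    · obtain ⟨hafter, hpre⟩ := hempty hs
      simp only [hs, dite_true, replace_comma_map]
      calc goA true cs = goA true ((pyPartition '[' cs).1 ++ []) := by rw [List.append_nil, hpre]
        _ = _ := by rw [goA_true_no_open _ [] hnotin]; simp [goA]
    · have hsep' : (pyPartition '[' cs).2.1 = ['['] := hsep.resolve_left hs
      have hlt := (pyPartition_after_le '[' cs).2 hs
      have hle := (pyPartition_after_le ']' (pyPartition '[' cs).2.2).1
      obtain ⟨hdec2, -, -, -⟩ := pyPartition_decomp ']' (pyPartition '[' cs).2.2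
      simp only [hs, dif_neg, not_false_iff, replace_comma_map]
      conv_lhs => rw [hdec, hsep']
      rw [show (pyPartition '[' cs).1 ++ ['['] ++ (pyPartition '[' cs).2.2
            = (pyPartition '[' cs).1 ++ ('[' :: (pyPartition '[' cs).2.2) by simp]
      rw [goA_true_no_open _ _ hnotin]
      have : goA true ('[' :: (pyPartition '[' cs).2.2) = '[' :: goA false (pyPartition '[' cs).2.2 := by
        simp [goA]
      rw [this, goA_false_part, ih _ (by omega)]

-- ===== VERDICT (by name: the statement is the Claim_ definition above) =====
theorem replace_comma_in_text_spec : Claim_equal_replace_comma_in_text := by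
  intro text _
  unfold Spec_replace_comma_in_text replace_comma_in_text replace_comma_in_text_alt
  rw [foldA_eq_goA text.toList ([], true), goA_eq_goB text.toList.length text.toList le_rfl]
  simp
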